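-- pv_equiv track=rewrite | github.com/kyucchoi/python-algorithm | level1/신규_아이디_추천/solution.py | solution
-- ===== SOURCE A (Python) =====
-- def solution(new_id):
--     # 대문자를 소문자로 변환
--     new_id = new_id.lower()
--
--     # 알파벳 소문자, 숫자, 빼기(-), 밑줄(_), 마침표(.)를 제외한 모든 문자 제거
--     allowed_chars = 'abcdefghijklmnopqrstuvwxyz0123456789-_.'
--     new_id = ''.join(char for char in new_id if char in allowed_chars)
--
--     # 마침표(.)가 2번 이상 연속된 부분을 하나의 마침표(.)로 치환
--     while '..' in new_id:
--         new_id = new_id.replace('..', '.')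
--
--     # 마침표(.)가 처음이나 끝에 위치한다면 제거
--     if new_id and new_id[0] == '.':
--         new_id = new_id[1:]
--     if new_id and new_id[-1] == '.':
--         new_id = new_id[:-1]
--
--     # 빈 문자열이라면, 'a'를 대입
--     if not new_id:
--         new_id = 'a'
--
--     # 길이가 16자 이상이면, 첫 15개 문자를 제외한 나머지 제거
--     # 제거 후 마침표(.)가 끝에 위치한다면 제거
--     if len(new_id) >= 16:
--         new_id = new_id[:15]
--
--         if new_id[-1] == '.':
--             new_id = new_id[:-1]
--
--     # 길이가 2자 이하라면, 마지막 문자를 길이가 3이 될 때까지 반복해서 붙임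
--     while len(new_id) <= 2:
--         new_id += new_id[-1]
--
--     return new_id
-- ===== SOURCE B (Python) =====
-- ALLOWED = set("abcdefghijklmnopqrstuvwxyz0123456789-_.")
--
-- def solution(new_id):
--     # single guarded left-to-right scan builds the cleaned core
--     buf = []
--     for ch in new_id:
--         ch = ch.lower()
--         if ch in ALLOWED and not (ch == '.' and (not buf or buf[-1] == '.')):
--             buf.append(ch)
--     if buf and buf[-1] == '.':
--         buf.pop()
--     if not buf:
--         buf = ['a']
--     if len(buf) >= 16:
--         buf = buf[:15]
--         if buf[-1] == '.':
--             buf.pop()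
--     if len(buf) <= 2:
--         buf += buf[-1] * (3 - len(buf))
--     return ''.join(buf)
-- ===== Notes on version B (the rewrite author's own statement) =====
-- stated objective: simpler
-- what changed: One guarded left-to-right scan over the input builds the cleaned core (lowercasing, filtering, collapsing consecutive dots and dropping leading dots in a single pass), replacing A's separate comprehension filter, repeated whole-string replace loop and leading-dot strip; the final pad-to-3 while loop becomes a single concatenation of a computed repetition.
import Mathlib
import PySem

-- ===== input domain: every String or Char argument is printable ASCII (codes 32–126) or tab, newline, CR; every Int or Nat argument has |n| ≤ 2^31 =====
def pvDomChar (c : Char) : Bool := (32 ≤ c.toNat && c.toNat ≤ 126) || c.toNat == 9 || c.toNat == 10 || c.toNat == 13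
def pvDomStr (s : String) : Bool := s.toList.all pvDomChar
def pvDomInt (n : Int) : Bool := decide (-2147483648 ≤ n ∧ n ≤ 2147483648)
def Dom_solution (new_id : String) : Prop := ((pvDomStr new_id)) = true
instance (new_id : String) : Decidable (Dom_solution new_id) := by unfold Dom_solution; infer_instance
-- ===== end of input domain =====

-- B rebuilds the cleaned core in one guarded scan (filter + dot-collapse + leading-dot drop at once)
-- and pads to length 3 by a single concatenation instead of A's replace-loop pipeline.

-- ===== PORT A =====
def pvAllowed : List Char := "abcdefghijklmnopqrstuvwxyz0123456789-_.".toList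

-- spec of one pass of Python's s.replace('..', '.'), used only for the while-loop's termination
def pvRep : List Char → List Char
  | [] => []
  | '.' :: '.' :: t => '.' :: pvRep t
  | c :: t => c :: pvRep t

theorem pvRep_length_le (l : List Char) : (pvRep l).length ≤ l.length := by
  induction l using pvRep.induct <;> simp [pvRep] <;> omega

theorem pvGo_eq_rep (fuel : Nat) (l acc : List Char) (h : l.length ≤ fuel) :
    PySem.Chars.replace.go ['.', '.'] ['.'] fuel l acc = acc.reverse ++ pvRep l := by
  induction fuel generalizing l acc with
  | zero =>
    have : l = [] := by cases l <;> simp at h ⊢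
    subst this; simp [PySem.Chars.replace.go, pvRep]
  | succ n ih =>
    match l with
    | [] => simp [PySem.Chars.replace.go, pvRep]
    | [c] =>
      rw [PySem.Chars.replace.go]
      have hp : ['.', '.'].isPrefixOf [c] = false := by simp [List.isPrefixOf]
      rw [hp]
      simp only [Bool.false_eq_true, if_false]
      rw [ih [] (c :: acc) (by simp)]
      rw [pvRep.eq_3 c [] (by intro _ _ h; cases h)]
      simp [pvRep]
    | c :: d :: t =>
      rw [PySem.Chars.replace.go]
      by_cases hc : c = '.' <;> by_cases hd : d = '.'
      · subst hc hd
        have hp : ['.', '.'].isPrefixOf ('.' :: '.' :: t) = true := by simp [List.isPrefixOf]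
        rw [hp]
        simp only [reduceIte]
        rw [show (['.', '.'] : List Char).length = 2 from rfl]
        simp only [List.drop_succ_cons, List.drop_zero]
        rw [ih t (['.'].reverse ++ acc) (by simp at h ⊢; omega)]
        simp [pvRep]
      all_goals {
        have hp : ['.', '.'].isPrefixOf (c :: d :: t) = false := by
          simp [List.isPrefixOf]
          intro h1 h2
          first
          | exact hc h1.symm
          | exact hd h2.symm
        rw [hp]
        simp only [Bool.false_eq_true, if_false]
        rw [ih (d :: t) (c :: acc) (by simp at h ⊢; omega)]
        rw [pvRep.eq_3 c (d :: t) (by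
          rintro t' h1 h2
          first | exact hc h1 | (injection h2 with h2a _; exact hd h2a))]
        simp
      }

theorem pvReplace_eq_rep (l : List Char) :
    PySem.Chars.replace l ['.', '.'] ['.'] = pvRep l := by
  simp [PySem.Chars.replace, pvGo_eq_rep l.length l [] le_rfl]

theorem pvRep_length_lt (l : List Char) (h : PySem.Chars.isIn ['.', '.'] l = true) :
    (pvRep l).length < l.length := by
  rw [PySem.Chars.isIn_iff_infix] at h
  induction l using pvRep.induct with
  | case1 => simp at h
  | case2 t ih =>
    have := pvRep_length_le t
    simp [pvRep]; omega
  | case3 c t hne ih =>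
    rw [List.infix_cons_iff] at h
    rcases h with h | h
    · exfalso
      rcases h with ⟨s, hs⟩
      cases t with
      | nil => simp at hs
      | cons d t' =>
        injection hs with h1 h2
        injection h2 with h2a _
        exact hne t' h1.symm (by rw [← h2a])
    · have := ih h
      rw [pvRep.eq_3 c t (by intro t' h1 h2; exact hne t' h1 (by rw [h2]))]
      simp; omega

-- Python:  while '..' in new_id: new_id = new_id.replace('..', '.')
def pvRepLoop (l : List Char) : List Char :=
  if h : PySem.Chars.isIn ['.', '.'] l = true then
    pvRepLoop (PySem.Chars.replace l ['.', '.'] ['.'])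
  else l
termination_by l.length
decreasing_by
  rw [pvReplace_eq_rep]; exact pvRep_length_lt l h

-- Python:  while len(new_id) <= 2: new_id += new_id[-1]
def pvPadLoop (l : List Char) : List Char :=
  if l.length ≤ 2 then
    match h : PySem.List.pyGet? l (-1) with
    | some c => pvPadLoop (l ++ [c])
    | none => l
  else l
termination_by 3 - l.length
decreasing_by
  have : l ≠ [] := by
    intro hnil; subst hnil; simp [PySem.List.pyGet?, PySem.List.pyIdx?] at h
  have : 1 ≤ l.length := List.length_pos_iff.mpr this
  simp; omega

def solution (new_id : String) : String :=
  let s1 := PySem.Chars.lower new_id.toList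
  let s2 := s1.filter (fun c => PySem.Chars.isIn [c] pvAllowed)
  let s3 := pvRepLoop s2
  let s4 := if s3 ≠ [] ∧ PySem.List.pyGet? s3 0 = some '.' then PySem.List.slice s3 (some 1) none else s3
  let s5 := if s4 ≠ [] ∧ PySem.List.pyGet? s4 (-1) = some '.' then PySem.List.slice s4 none (some (-1)) else s4
  let s6 := if s5 = [] then ['a'] else s5
  let s7 :=
    if 16 ≤ s6.length then
      let t := PySem.List.slice s6 none (some 15)
      if PySem.List.pyGet? t (-1) = some '.' then PySem.List.slice t none (some (-1)) else t
    else s6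
  String.mk (pvPadLoop s7)

-- ===== PORT B =====
def pvAllowedSet : PySem.Set Char := PySem.Set.ofList "abcdefghijklmnopqrstuvwxyz0123456789-_.".toList

def solution_alt (new_id : String) : String :=
  let buf := new_id.toList.foldl
    (fun buf c =>
      let ch := PySem.Chars.lowerChar c
      if PySem.Set.contains pvAllowedSet ch = true ∧ ¬ (ch = '.' ∧ (buf = [] ∨ buf.getLast? = some '.')) then
        buf ++ [ch]
      else buf) []
  let b2 := if buf.getLast? = some '.' then buf.dropLast else buf
  let b3 := if b2 = [] then ['a'] else b2
  let b4 :=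
    if 16 ≤ b3.length then
      let t := b3.take 15
      if t.getLast? = some '.' then t.dropLast else t
    else b3
  let b5 :=
    if b4.length ≤ 2 then
      match b4.getLast? with
      | some c => b4 ++ List.replicate (3 - b4.length) c
      | none => b4
    else b4
  String.mk b5

-- ===== PRECONDITION & SPEC =====
def Spec_solution (new_id : String) (out : String) : Prop := out = solution_alt new_id
instance (new_id : String) (out : String) : Decidable (Spec_solution new_id out) := by unfold Spec_solution; infer_instance

-- ===== CLAIM (what is proved, stated in full; the proofs are below) =====
def Claim_equal_solution : Prop := ∀ (new_id : String), Dom_solution new_id → Spec_solution new_id (solution new_id)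

-- ===== LEMMAS AND PROOFS =====

-- the dot-collapsing scan; b = "a dot would be skipped here" (buffer empty or ends in '.')
def pvH (b : Bool) : List Char → List Char
  | [] => []
  | c :: t => if c = '.' then (if b then pvH true t else '.' :: pvH true t) else c :: pvH false t

theorem pvH_rep (b : Bool) (l : List Char) : pvH b (pvRep l) = pvH b l := by
  induction l using pvRep.induct generalizing b with
  | case1 => simp [pvRep]
  | case2 t ih => simp [pvRep, pvH, ih]
  | case3 c t hne ih =>
    rw [pvRep.eq_3 c t (fun t' h1 h2 => hne t' h1 h2)]
    by_cases hc : c = '.' <;> simp [pvH, hc, ih]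

theorem pvH_fix (l : List Char) (h : ¬ ['.', '.'] <:+: l) :
    pvH false l = l ∧ (l.head? ≠ some '.' → pvH true l = l) := by
  induction l with
  | nil => simp [pvH]
  | cons c t ih =>
    rw [List.infix_cons_iff] at h
    push_neg at h
    obtain ⟨hpre, hinf⟩ := h
    have iht := ih hinf
    by_cases hc : c = '.'
    · subst hc
      have hhead : t.head? ≠ some '.' := by
        intro hh
        cases t with
        | nil => simp at hh
        | cons d t' =>
          simp at hh
          exact hpre (by rw [hh]; exact ⟨t', rfl⟩)
      constructor
      · simp [pvH, iht.2 hhead]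
      · intro hcontra; simp at hcontra
    · exact ⟨by simp [pvH, hc, iht.1], fun _ => by simp [pvH, hc, iht.1]⟩

theorem pvRepLoop_eq_H (l : List Char) : pvRepLoop l = pvH false l := by
  induction l using pvRepLoop.induct with
  | case1 l h ih =>
    rw [pvRepLoop, dif_pos h, ih, pvReplace_eq_rep, pvH_rep]
  | case2 l h =>
    rw [pvRepLoop, dif_neg h]
    have := pvH_fix l (by
      intro hinf
      exact h ((PySem.Chars.isIn_iff_infix _ _).mpr hinf))
    exact this.1.symm

theorem pvScan_fold (L : List Char) : ∀ (buf : List Char),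
    L.foldl (fun buf c =>
      if c = '.' ∧ (buf = [] ∨ buf.getLast? = some '.') then buf else buf ++ [c]) buf
    = buf ++ pvH (decide (buf = [] ∨ buf.getLast? = some '.')) L := by
  induction L with
  | nil => intro buf; simp [pvH]
  | cons c t ih =>
    intro buf
    by_cases hcond : c = '.' ∧ (buf = [] ∨ buf.getLast? = some '.')
    · rw [List.foldl_cons, if_pos hcond, ih buf]
      obtain ⟨hc, hb⟩ := hcond
      subst hc
      simp [pvH, hb]
    · rw [List.foldl_cons, if_neg hcond, ih (buf ++ [c])]
      by_cases hc : c = '.'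
      · subst hc
        have hb : ¬ (buf = [] ∨ buf.getLast? = some '.') := fun hb => hcond ⟨rfl, hb⟩
        simp [pvH, hb]
      · simp [pvH, hc]

theorem pvStripLead (L : List Char) :
    (if pvH false L ≠ [] ∧ PySem.List.pyGet? (pvH false L) 0 = some '.'
       then PySem.List.slice (pvH false L) (some 1) none else pvH false L) = pvH true L := by
  cases L with
  | nil => simp [pvH]
  | cons c t =>
    by_cases hc : c = '.'
    · subst hc
      simp [pvH, pysem]
    · simp [pvH, hc, pysem]

theorem pvCondTrail (l : List Char) :
    (l ≠ [] ∧ l.getLast? = some '.') ↔ l.getLast? = some '.' := by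
  constructor
  · exact fun h => h.2
  · intro h
    refine ⟨?_, h⟩
    intro hnil; subst hnil
    simp at h

theorem pvPad (l : List Char) (hne : l ≠ []) :
    pvPadLoop l =
      (if l.length ≤ 2 then
        match l.getLast? with
        | some c => l ++ List.replicate (3 - l.length) c
        | none => l
      else l) := by
  match l, hne with
  | [a], _ =>
    rw [pvPadLoop.eq_def]
    rw [if_pos (by simp)]
    split
    · rename_i c hc
      rw [PySem.List.pyGet?_neg_one] at hc
      simp at hc
      subst hc
      rw [pvPadLoop.eq_def]
      rw [if_pos (by simp)]
      split
      · rename_i c hc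
        rw [PySem.List.pyGet?_neg_one] at hc
        simp at hc
        subst hc
        rw [pvPadLoop.eq_def]
        simp [List.replicate]
      · rename_i hc
        rw [PySem.List.pyGet?_neg_one] at hc
        simp at hc
    · rename_i hc
      rw [PySem.List.pyGet?_neg_one] at hc
      simp at hc
  | [a, b], _ =>
    rw [pvPadLoop.eq_def]
    rw [if_pos (by simp)]
    split
    · rename_i c hc
      rw [PySem.List.pyGet?_neg_one] at hc
      simp at hc
      subst hc
      rw [pvPadLoop.eq_def]
      simp
    · rename_i hc
      rw [PySem.List.pyGet?_neg_one] at hc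
      simp at hc
  | a :: b :: c :: t, _ =>
    rw [pvPadLoop.eq_def]
    simp

theorem pvSingleton_isIn (c : Char) (al : List Char) :
    PySem.Chars.isIn [c] al = al.contains c := by
  by_cases h : c ∈ al
  · rw [(PySem.Chars.isIn_iff_infix _ _).mpr ((List.singleton_infix_iff c al).mpr h)]
    simp [h]
  · have : ¬ [c] <:+: al := by
      intro hinf
      exact h (hinf.subset (by simp))
    rw [(PySem.Chars.isIn_eq_false_iff _ _).mpr this]
    simp [h]

-- ===== VERDICT (by name: the statement is the Claim_ definition above) =====
set_option maxRecDepth 4096 in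
theorem solution_spec : Claim_equal_solution := by
  intro new_id _
  unfold Spec_solution solution solution_alt
  have hAS : pvAllowedSet = pvAllowed := by decide
  dsimp only
  set cs := new_id.toList with hcs
  set L : List Char := (cs.map PySem.Chars.lowerChar).filter (fun c => pvAllowed.contains c) with hL
  have hbuf :
      cs.foldl (fun buf c =>
        if PySem.Set.contains pvAllowedSet (PySem.Chars.lowerChar c) = true ∧
            ¬ (PySem.Chars.lowerChar c = '.' ∧ (buf = [] ∨ buf.getLast? = some '.')) then
          buf ++ [PySem.Chars.lowerChar c]
        else buf) []
      = pvH true L := by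
    have h1 : (fun (buf : List Char) (c : Char) =>
        if PySem.Set.contains pvAllowedSet (PySem.Chars.lowerChar c) = true ∧
            ¬ (PySem.Chars.lowerChar c = '.' ∧ (buf = [] ∨ buf.getLast? = some '.')) then
          buf ++ [PySem.Chars.lowerChar c]
        else buf)
        = (fun (buf : List Char) (c : Char) =>
        if pvAllowed.contains (PySem.Chars.lowerChar c) = true then
          (if PySem.Chars.lowerChar c = '.' ∧ (buf = [] ∨ buf.getLast? = some '.') then buf
           else buf ++ [PySem.Chars.lowerChar c])
        else buf) := by
      funext buf c
      rw [hAS]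
      by_cases h : pvAllowed.contains (PySem.Chars.lowerChar c) = true <;>
        by_cases h2 : PySem.Chars.lowerChar c = '.' ∧ (buf = [] ∨ buf.getLast? = some '.') <;>
        simp [h, h2]
    rw [h1, PySem.List.foldl_ite_eq_foldl_filter
      (p := fun c => pvAllowed.contains (PySem.Chars.lowerChar c) = true)
      (f := fun (buf : List Char) (c : Char) =>
        if PySem.Chars.lowerChar c = '.' ∧ (buf = [] ∨ buf.getLast? = some '.') then buf
        else buf ++ [PySem.Chars.lowerChar c])]
    rw [← List.foldl_map (f := PySem.Chars.lowerChar)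
      (g := fun (buf : List Char) (c : Char) =>
        if c = '.' ∧ (buf = [] ∨ buf.getLast? = some '.') then buf else buf ++ [c])]
    have h2 : (cs.filter (fun c => decide (pvAllowed.contains (PySem.Chars.lowerChar c) = true))).map
        PySem.Chars.lowerChar = L := by
      rw [hL, List.filter_map]
      congr 1
      apply List.filter_congr
      intro x _
      simp
    rw [h2, pvScan_fold L []]
    simp
  have hA2 : (PySem.Chars.lower cs).filter (fun c => PySem.Chars.isIn [c] pvAllowed) = L := by
    rw [show PySem.Chars.lower cs = cs.map PySem.Chars.lowerChar from rfl, hL]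
    apply List.filter_congr
    intro x _
    exact pvSingleton_isIn x pvAllowed
  rw [hbuf, hA2, pvRepLoop_eq_H, pvStripLead]
  simp only [PySem.List.pyGet?_neg_one, Int.reduceNeg,
    PySem.List.slice_to_neg_one, PySem.List.slice_to, Nat.ofNat_nonneg, Int.reduceToNat]
  simp only [pvCondTrail]
  generalize (if (pvH true L).getLast? = some '.' then (pvH true L).dropLast else pvH true L) = x
  generalize hy : (if x = [] then ['a'] else x) = y
  have hyne : y ≠ [] := by
    rw [← hy]; split
    · simp
    · assumption
  have hzne : (if 16 ≤ y.length then
      (if (y.take 15).getLast? = some '.' then (y.take 15).dropLast else y.take 15)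
    else y) ≠ [] := by
    split
    · rename_i h16
      have hlen : (y.take 15).length = 15 := by
        rw [List.length_take]; omega
      split
      · intro hemp
        have := congrArg List.length hemp
        rw [List.length_dropLast, hlen] at this
        simp at this
      · intro hemp
        have := congrArg List.length hemp
        rw [hlen] at this
        simp at this
    · exact hyne
  rw [pvPad _ hzne]
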